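-- pv_equiv track=rewrite | github.com/CREATEGroup5/Data | Task_Recognition/Train_CNN_LSTM.py | splitVideoIntoSequences
-- ===== SOURCE A (Python) =====
-- def splitVideoIntoSequences(images,sequenceLength=5, downsampling=2):
--     number_of_sequences = len(images) - ((sequenceLength) * downsampling)
--     sequences = []
--     prevSequences = [[-1 for i in range(sequenceLength)] for j in range(downsampling)]
--     for x in range(sequenceLength):
--         for y in range(downsampling):
--             newSeq = prevSequences[y][1:]
--             newSeq.append(images[(x * downsampling) + y])
--             prevSequences[y] = newSeq
--             sequences.append(prevSequences[y])
--     for x in range(0, number_of_sequences):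
--         sequences.append([images[i] for i in range(x, (x + sequenceLength * downsampling), downsampling)])
--     return sequences
-- ===== SOURCE B (Python) =====
-- def splitVideoIntoSequences(images, sequenceLength=5, downsampling=2):
--     # Warm-up windows built directly: closed-form -1 padding plus a strided gather,
--     # instead of A's rolling prevSequences buffers.
--     sequences = [
--         [-1] * (sequenceLength - x - 1)
--         + [images[j * downsampling + y] for j in range(x + 1)]
--         for x in range(sequenceLength)
--         for y in range(downsampling)
--     ]
--     return sequences + [
--         [images[i] for i in range(x, x + sequenceLength * downsampling, downsampling)]
--         for x in range(len(images) - sequenceLength * downsampling)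
--     ]
-- ===== Notes on version B (the rewrite author's own statement) =====
-- stated objective: simpler
-- what changed: B builds each warm-up window directly as a closed-form [-1] padding plus a strided index gather in one comprehension, eliminating A's mutable prevSequences rolling-buffer array that is sliced, appended to and written back each iteration; the main-window pass becomes a comprehension appended to the result.
import Mathlib
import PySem

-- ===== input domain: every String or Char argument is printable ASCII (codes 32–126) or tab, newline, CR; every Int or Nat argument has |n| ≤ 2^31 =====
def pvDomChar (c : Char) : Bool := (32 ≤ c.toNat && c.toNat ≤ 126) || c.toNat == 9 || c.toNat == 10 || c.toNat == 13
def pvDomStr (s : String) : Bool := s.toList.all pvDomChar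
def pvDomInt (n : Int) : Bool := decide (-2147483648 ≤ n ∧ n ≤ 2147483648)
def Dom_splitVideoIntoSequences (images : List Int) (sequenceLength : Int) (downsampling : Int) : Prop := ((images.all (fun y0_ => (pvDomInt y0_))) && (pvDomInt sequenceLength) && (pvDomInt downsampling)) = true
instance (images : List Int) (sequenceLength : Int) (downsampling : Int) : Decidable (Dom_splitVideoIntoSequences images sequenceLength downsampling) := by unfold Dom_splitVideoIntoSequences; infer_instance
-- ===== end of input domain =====

-- B replaces A's mutable rolling prevSequences buffers by building each warm-up window
-- directly (closed-form [-1] padding plus a strided index gather); objective: simpler.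

-- ===== PORT A =====
def splitVideoIntoSequences (images : List Int) (sequenceLength : Int) (downsampling : Int) : List (List Int) :=
  let number_of_sequences : Int := (images.length : Int) - sequenceLength * downsampling
  let prevSequences : List (List Int) :=
    (PySem.List.pyRange 0 downsampling 1).map (fun _ =>
      (PySem.List.pyRange 0 sequenceLength 1).map (fun _ => (-1 : Int)))
  let st : List (List Int) × List (List Int) :=
    (PySem.List.pyRange 0 sequenceLength 1).foldl
      (fun st x =>
        (PySem.List.pyRange 0 downsampling 1).foldl
          (fun st y =>
            let newSeq : List Int :=
              PySem.List.slice (PySem.List.pyGetD st.1 y []) (some 1) none ++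
                [PySem.List.pyGetD images (x * downsampling + y) 0]
            (PySem.List.pySetD st.1 y newSeq, st.2 ++ [newSeq]))
          st)
      (prevSequences, ([] : List (List Int)))
  (PySem.List.pyRange 0 number_of_sequences 1).foldl
    (fun sequences x =>
      sequences ++ [(PySem.List.pyRange x (x + sequenceLength * downsampling) downsampling).map
        (fun i => PySem.List.pyGetD images i 0)])
    st.2

-- ===== PORT B =====
def splitVideoIntoSequences_alt (images : List Int) (sequenceLength : Int) (downsampling : Int) : List (List Int) :=
  let sequences : List (List Int) :=
    (PySem.List.pyRange 0 sequenceLength 1).flatMap (fun x =>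
      (PySem.List.pyRange 0 downsampling 1).map (fun y =>
        List.replicate (sequenceLength - x - 1).toNat (-1) ++
          (PySem.List.pyRange 0 (x + 1) 1).map
            (fun j => PySem.List.pyGetD images (j * downsampling + y) 0)))
  sequences ++
    (PySem.List.pyRange 0 ((images.length : Int) - sequenceLength * downsampling) 1).map
      (fun x =>
        (PySem.List.pyRange x (x + sequenceLength * downsampling) downsampling).map
          (fun i => PySem.List.pyGetD images i 0))

-- ===== PRECONDITION & SPEC =====
-- Pre_ excludes exactly the inputs on which the Python A raises: with 1 ≤ sequenceLength it
-- raises IndexError unless 1 ≤ downsampling and sequenceLength*downsampling ≤ len(images)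
-- (or downsampling = 0 with empty images, where both loops are vacuous); with
-- sequenceLength ≤ 0 it raises ValueError when downsampling = 0 and images ≠ [].
def Pre_splitVideoIntoSequences (images : List Int) (sequenceLength : Int) (downsampling : Int) : Prop :=
  if 1 ≤ sequenceLength then
    (1 ≤ downsampling ∧ sequenceLength * downsampling ≤ (images.length : Int)) ∨
      (downsampling = 0 ∧ images = [])
  else downsampling ≠ 0 ∨ images = []
instance (images : List Int) (sequenceLength : Int) (downsampling : Int) : Decidable (Pre_splitVideoIntoSequences images sequenceLength downsampling) := by unfold Pre_splitVideoIntoSequences; infer_instance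

def pvWitness_splitVideoIntoSequences : List Int × Int × Int := ([10, 20, 30, 40], 2, 2)

def Spec_splitVideoIntoSequences (images : List Int) (sequenceLength : Int) (downsampling : Int) (out : List (List Int)) : Prop := out = splitVideoIntoSequences_alt images sequenceLength downsampling
instance (images : List Int) (sequenceLength : Int) (downsampling : Int) (out : List (List Int)) : Decidable (Spec_splitVideoIntoSequences images sequenceLength downsampling out) := by unfold Spec_splitVideoIntoSequences; infer_instance

-- ===== CLAIM (what is proved, stated in full; the proofs are below) =====
def Claim_equal_splitVideoIntoSequences : Prop := ∀ (images : List Int) (sequenceLength : Int) (downsampling : Int), Dom_splitVideoIntoSequences images sequenceLength downsampling → Pre_splitVideoIntoSequences images sequenceLength downsampling → Spec_splitVideoIntoSequences images sequenceLength downsampling (splitVideoIntoSequences images sequenceLength downsampling)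

-- ===== LEMMAS AND PROOFS =====

-- The warm-up window held in prevSequences[y] after x outer iterations of A's first loop.
def pvWin (images : List Int) (s d x y : Int) : List Int :=
  List.replicate (s - x).toNat (-1) ++
    (PySem.List.pyRange 0 x 1).map (fun j => PySem.List.pyGetD images (j * d + y) 0)

-- writing position a of a range-indexed table keeps it range-indexed
lemma pvSetPyRangeMap {α : Type} (f : Int → α) (d a : Int) (h0 : 0 ≤ a) (v : α) :
    ((PySem.List.pyRange 0 d 1).map f).set a.toNat v
      = (PySem.List.pyRange 0 d 1).map (fun y => if y = a then v else f y) := by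
  rw [PySem.List.pyRange_one]
  simp only [List.map_map]
  apply List.ext_getElem
  · simp
  · intro i h1 h2
    simp only [List.length_set, List.length_map, List.length_range] at h1 h2
    simp only [List.getElem_set, List.getElem_map, List.getElem_range, Function.comp_apply, zero_add]
    split_ifs <;> first | rfl | omega

-- A's inner loop over y: reads entry y of the table, rewrites it, snapshots it
lemma pvInner (images : List Int) (x d : Int) :
    ∀ (n : Nat) (a : Int) (Q : Int → List Int) (seqs : List (List Int)),
      0 ≤ a → d - a = (n : Int) →
      (PySem.List.pyRange a d 1).foldl
        (fun st y =>
          let newSeq : List Int :=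
            PySem.List.slice (PySem.List.pyGetD st.1 y []) (some 1) none ++
              [PySem.List.pyGetD images (x * d + y) 0]
          (PySem.List.pySetD st.1 y newSeq, st.2 ++ [newSeq]))
        ((PySem.List.pyRange 0 d 1).map Q, seqs)
      = ((PySem.List.pyRange 0 d 1).map (fun y =>
            if a ≤ y then
              PySem.List.slice (Q y) (some 1) none ++ [PySem.List.pyGetD images (x * d + y) 0]
            else Q y),
         seqs ++ (PySem.List.pyRange a d 1).map (fun y =>
            PySem.List.slice (Q y) (some 1) none ++ [PySem.List.pyGetD images (x * d + y) 0])) := by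
  intro n
  induction n with
  | zero =>
    intro a Q seqs ha hn
    have hda : d ≤ a := by omega
    rw [PySem.List.pyRange_one_eq_nil hda]
    simp only [List.foldl_nil, List.map_nil, List.append_nil]
    congr 1
    apply List.map_congr_left
    intro y hy
    rw [PySem.List.mem_pyRange_one] at hy
    rw [if_neg (by omega)]
  | succ n ih =>
    intro a Q seqs ha hn
    have had : a < d := by omega
    rw [PySem.List.pyRange_one_cons had]
    simp only [List.foldl_cons, List.map_cons]
    rw [PySem.List.pyGetD_map_pyRange_of_nonneg Q d a _ ha had]
    rw [PySem.List.pySetD_of_nonneg _ _ ha]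
    rw [pvSetPyRangeMap Q d a ha]
    rw [ih (a + 1)
        (fun y => if y = a then
            PySem.List.slice (Q a) (some 1) none ++ [PySem.List.pyGetD images (x * d + a) 0]
          else Q y)
        (seqs ++ [PySem.List.slice (Q a) (some 1) none ++ [PySem.List.pyGetD images (x * d + a) 0]])
        (by omega) (by omega)]
    refine congrArg₂ Prod.mk ?_ ?_
    · apply List.map_congr_left
      intro y hy
      rw [PySem.List.mem_pyRange_one] at hy
      by_cases hya : y = a
      · subst hya; simp
      · simp only [hya, if_false]
        split_ifs <;> first | rfl | omega
    · rw [List.append_assoc]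
      congr 1
      simp only [List.cons_append, List.nil_append]
      congr 1
      apply List.map_congr_left
      intro y hy
      rw [PySem.List.mem_pyRange_one] at hy
      have hne : y ≠ a := by omega
      simp [hne]

-- one outer step rotates every buffer: drop the head, append the fresh frame
lemma pvStep (images : List Int) (s d x y : Int) (hx : 0 ≤ x) (hxs : x < s) :
    PySem.List.slice (pvWin images s d x y) (some 1) none ++
        [PySem.List.pyGetD images (x * d + y) 0]
      = pvWin images s d (x + 1) y := by
  unfold pvWin
  rw [PySem.List.slice_from_one]
  rw [show (s - x).toNat = (s - (x + 1)).toNat + 1 by omega]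
  rw [List.replicate_succ, List.cons_append, List.tail_cons,
      PySem.List.pyRange_one_succ_right hx, List.map_append, List.append_assoc]
  simp

-- A's outer loop invariant: the table holds the windows for step a; each iteration
-- snapshots the d freshly rotated windows
lemma pvOuter (images : List Int) (s d : Int) :
    ∀ (n : Nat) (a : Int) (acc : List (List Int)),
      0 ≤ a → s - a = (n : Int) →
      (PySem.List.pyRange a s 1).foldl
        (fun st x =>
          (PySem.List.pyRange 0 d 1).foldl
            (fun st y =>
              let newSeq : List Int :=
                PySem.List.slice (PySem.List.pyGetD st.1 y []) (some 1) none ++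
                  [PySem.List.pyGetD images (x * d + y) 0]
              (PySem.List.pySetD st.1 y newSeq, st.2 ++ [newSeq]))
            st)
        ((PySem.List.pyRange 0 d 1).map (pvWin images s d a), acc)
      = ((PySem.List.pyRange 0 d 1).map (pvWin images s d s),
         acc ++ (PySem.List.pyRange a s 1).flatMap
           (fun x => (PySem.List.pyRange 0 d 1).map (pvWin images s d (x + 1)))) := by
  intro n
  induction n with
  | zero =>
    intro a acc ha hn
    have has : a = s := by omega
    subst has
    rw [PySem.List.pyRange_one_eq_nil le_rfl]
    simp
  | succ n ih =>
    intro a acc ha hn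
    have has : a < s := by omega
    rw [PySem.List.pyRange_one_cons has]
    simp only [List.foldl_cons]
    by_cases hd : 0 ≤ d
    · rw [pvInner images a d d.toNat 0 (pvWin images s d a) acc le_rfl (by omega)]
      have hmap : ((PySem.List.pyRange 0 d 1).map (fun y =>
            if 0 ≤ y then
              PySem.List.slice (pvWin images s d a y) (some 1) none ++
                [PySem.List.pyGetD images (a * d + y) 0]
            else pvWin images s d a y))
          = (PySem.List.pyRange 0 d 1).map (pvWin images s d (a + 1)) := by
        apply List.map_congr_left
        intro y hy
        rw [PySem.List.mem_pyRange_one] at hy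
        rw [if_pos (by omega), pvStep images s d a y ha has]
      have hmap2 : ((PySem.List.pyRange 0 d 1).map (fun y =>
              PySem.List.slice (pvWin images s d a y) (some 1) none ++
                [PySem.List.pyGetD images (a * d + y) 0]))
          = (PySem.List.pyRange 0 d 1).map (pvWin images s d (a + 1)) := by
        apply List.map_congr_left
        intro y hy
        rw [PySem.List.mem_pyRange_one] at hy
        rw [pvStep images s d a y ha has]
      rw [hmap, hmap2, ih (a + 1) (acc ++ (PySem.List.pyRange 0 d 1).map (pvWin images s d (a + 1)))
        (by omega) (by omega)]
      rw [List.flatMap_cons, List.append_assoc]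
    · have hd0 : d ≤ 0 := by omega
      simp only [PySem.List.pyRange_one_eq_nil hd0, List.map_nil, List.foldl_nil]
      have := ih (a + 1) acc (by omega) (by omega)
      simp only [PySem.List.pyRange_one_eq_nil hd0, List.map_nil, List.foldl_nil] at this
      rw [this]
      simp

-- initial table = windows for step 0
lemma pvInit (images : List Int) (s d : Int) :
    (PySem.List.pyRange 0 d 1).map (fun _ =>
        (PySem.List.pyRange 0 s 1).map (fun _ => (-1 : Int)))
      = (PySem.List.pyRange 0 d 1).map (pvWin images s d 0) := by
  apply List.map_congr_left
  intro y _
  unfold pvWin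
  rw [PySem.List.pyRange_one_eq_nil le_rfl]
  simp [PySem.List.pyRange_one, Function.comp_def, List.map_const']

-- ===== VERDICT (by name: the statement is the Claim_ definition above) =====
theorem splitVideoIntoSequences_spec : Claim_equal_splitVideoIntoSequences := by
  intro images s d _ _
  unfold Spec_splitVideoIntoSequences
  simp only [splitVideoIntoSequences, splitVideoIntoSequences_alt]
  rw [PySem.List.foldl_append_singleton_eq_map, pvInit images s d]
  have hW : ∀ x : Int,
      (fun y => List.replicate (s - x - 1).toNat (-1 : Int) ++
        (PySem.List.pyRange 0 (x + 1) 1).map (fun j => PySem.List.pyGetD images (j * d + y) 0))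
        = pvWin images s d (x + 1) := by
    intro x
    funext y
    unfold pvWin
    rw [sub_sub]
  by_cases hs : 0 ≤ s
  · rw [pvOuter images s d s.toNat 0 [] le_rfl (by omega)]
    simp only [hW, List.nil_append]
  · rw [PySem.List.pyRange_one_eq_nil (by omega : s ≤ (0:Int))]
    simp
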